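-- pv_equiv track=rewrite | github.com/Programs-Exam/Programs-Exam | Задание_23/23.1/23.1.py | f
-- ===== SOURCE A (Python) =====
-- def f(x, finish):
--    if x == finish:
--       return 1
--    if x > finish or x == 21:
--       return 0
--    if x % 2:
--       x3 = x+x+1
--    else:
--       x3 = x+x+2
--    return f(x+1, finish)+f(x+4, finish)+f(x3, finish)
-- ===== SOURCE B (Python) =====
-- def f(x, finish):
--     if x == finish:
--         return 1
--     if x > finish or x == 21:
--         return 0
--     # DP table built back-to-front: table[i] = number of paths from finish - i
--     table = [1]
--
--     def at_(v):
--         if v == finish: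
--             return 1
--         if v > finish or v == 21:
--             return 0
--         return table[finish - v]
--
--     for v in range(finish - 1, x - 1, -1):
--         if v == 21:
--             table.append(0)
--         else:
--             x3 = v + v + 1 if v % 2 else v + v + 2
--             table.append(at_(v + 1) + at_(v + 4) + at_(x3))
--     return table[finish - x]
-- ===== Notes on version B (the rewrite author's own statement) =====
-- stated objective: alternative
-- what changed: Replaces A's triple-branching top-down recursion with a single bottom-up DP pass that fills a table of path counts from finish down to x.
import Mathlib
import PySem

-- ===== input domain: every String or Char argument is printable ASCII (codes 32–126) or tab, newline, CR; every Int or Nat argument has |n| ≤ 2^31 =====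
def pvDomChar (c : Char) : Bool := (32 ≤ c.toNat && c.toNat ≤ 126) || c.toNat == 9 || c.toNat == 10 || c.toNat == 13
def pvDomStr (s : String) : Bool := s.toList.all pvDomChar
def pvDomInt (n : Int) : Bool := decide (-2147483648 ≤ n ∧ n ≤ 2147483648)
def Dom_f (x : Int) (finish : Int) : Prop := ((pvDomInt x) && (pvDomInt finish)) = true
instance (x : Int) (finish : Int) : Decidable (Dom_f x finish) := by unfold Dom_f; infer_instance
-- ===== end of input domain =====

-- B replaces A's triple-branching top-down recursion by a bottom-up DP table over [x, finish]; equivalence proved on Pre_f (where A terminates).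

-- ===== PORT A =====
-- A's recursion is not structurally terminating on all Int inputs (for x < 0 < finish it
-- loops forever), so the port uses a fuel counter; fuel (finish - x).toNat + 1 bounds the
-- true recursion depth on Pre_f, where each call strictly increases x toward finish.
def fA : Nat → Int → Int → Int
  | 0, _, _ => 0
  | fuel+1, x, finish =>
    if x = finish then 1
    else if x > finish ∨ x = 21 then 0
    else
      -- Python's `x % 2` equals Lean's `x % 2` for divisor 2 (both in {0,1})
      let x3 := if x % 2 = 1 then x + x + 1 else x + x + 2
      fA fuel (x+1) finish + fA fuel (x+4) finish + fA fuel x3 finish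

def f (x : Int) (finish : Int) : Int := fA ((finish - x).toNat + 1) x finish

-- ===== PORT B =====
-- table lookup helper `at_` of Source B; the list index is always in range, so getD is exact here
def atT (finish : Int) (table : List Int) (v : Int) : Int :=
  if v = finish then 1
  else if v > finish ∨ v = 21 then 0
  else table.getD (finish - v).toNat 0

-- the `for v in range(finish-1, x-1, -1)` loop of Source B; v = finish - len(table) at each step
def build (finish : Int) : Nat → List Int → List Int
  | 0, t => t
  | k+1, t =>
    let v : Int := finish - t.length
    let e : Int :=
      if v = 21 then 0
      else atT finish t (v+1) + atT finish t (v+4) +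
           atT finish t (if v % 2 = 1 then v + v + 1 else v + v + 2)
    build finish k (t ++ [e])

def f_alt (x : Int) (finish : Int) : Int :=
  if x = finish then 1
  else if x > finish ∨ x = 21 then 0
  else
    let table := build finish (finish - x).toNat [1]
    table.getD (finish - x).toNat 0

-- ===== PRECONDITION & SPEC =====
-- Pre_f excludes exactly the inputs where A never returns (RecursionError): for x < 0 with
-- x < finish the move x3 = 2x+1 / 2x+2 does not increase x, so A recurses forever.
def Pre_f (x : Int) (finish : Int) : Prop := 0 ≤ x ∨ finish ≤ x
instance (x : Int) (finish : Int) : Decidable (Pre_f x finish) := by unfold Pre_f; infer_instance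
def pvWitness_f : Int × Int := (0, 5)

def Spec_f (x : Int) (finish : Int) (out : Int) : Prop := out = f_alt x finish
instance (x : Int) (finish : Int) (out : Int) : Decidable (Spec_f x finish out) := by unfold Spec_f; infer_instance

-- ===== CLAIM (what is proved, stated in full; the proofs are below) =====
def Claim_equal_f : Prop := ∀ (x : Int) (finish : Int), Dom_f x finish → Pre_f x finish → Spec_f x finish (f x finish)

-- ===== LEMMAS AND PROOFS =====

-- any fuel at least the depth bound gives the same value (on Pre_f)
lemma fA_step (m : Nat) (x finish : Int) :
    fA (m+1) x finish =
      if x = finish then 1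
      else if x > finish ∨ x = 21 then 0
      else fA m (x+1) finish + fA m (x+4) finish +
           fA m (if x % 2 = 1 then x + x + 1 else x + x + 2) finish := rfl

-- any fuel at least the depth bound gives the same value (on Pre_f)
lemma fA_stable (finish : Int) : ∀ (fuel fuel' : Nat) (x : Int), (0 ≤ x ∨ finish ≤ x) →
    (finish - x).toNat + 1 ≤ fuel → (finish - x).toNat + 1 ≤ fuel' →
    fA fuel x finish = fA fuel' x finish := by
  intro fuel
  induction fuel with
  | zero => intro fuel' x _ h _; omega
  | succ m ih =>
    intro fuel' x hpre h h'
    cases fuel' with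
    | zero => omega
    | succ m' =>
      rw [fA_step m, fA_step m']
      by_cases h1 : x = finish
      · simp [h1]
      · by_cases h2 : x > finish ∨ x = 21
        · simp [h1, h2]
        · rw [if_neg h1, if_neg h2, if_neg h1, if_neg h2]
          have hx0 : 0 ≤ x := by
            rcases hpre with h0 | h0
            · exact h0
            · exfalso; apply h2; left; omega
          have hlt : x < finish := by
            rcases not_or.mp h2 with ⟨hng, _⟩; omega
          have e1 := ih m' (x+1) (Or.inl (by omega)) (by omega) (by omega)
          have e2 := ih m' (x+4) (Or.inl (by omega)) (by omega) (by omega)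
          by_cases hm : x % 2 = 1
          · have e3 := ih m' (x + x + 1) (Or.inl (by omega)) (by omega) (by omega)
            rw [if_pos hm, e1, e2, e3]
          · have e3 := ih m' (x + x + 2) (Or.inl (by omega)) (by omega) (by omega)
            rw [if_neg hm, e1, e2, e3]

lemma f_base_self (finish : Int) : f finish finish = 1 := by
  simp [f, fA]

lemma f_gt (x finish : Int) (h : finish < x) : f x finish = 0 := by
  have hne : ¬ x = finish := by omega
  simp [f, fA, hne]
  omega

lemma f_21 (finish : Int) (h : (21:Int) ≠ finish) : f 21 finish = 0 := by
  simp [f, fA, h]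

lemma f_unfold (x finish : Int) (h0 : 0 ≤ x) (hlt : x < finish) (h21 : x ≠ 21) :
    f x finish = f (x+1) finish + f (x+4) finish +
      f (if x % 2 = 1 then x + x + 1 else x + x + 2) finish := by
  have hne : ¬ x = finish := by omega
  have hnb : ¬ (x > finish ∨ x = 21) := not_or.mpr ⟨by omega, h21⟩
  have hfg : 1 ≤ (finish - x).toNat := by omega
  rw [f]
  rw [fA_step, if_neg hne, if_neg hnb]
  have e1 : fA (finish - x).toNat (x+1) finish = f (x+1) finish :=
    fA_stable finish _ _ _ (Or.inl (by omega)) (by omega) (by omega)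
  have e2 : fA (finish - x).toNat (x+4) finish = f (x+4) finish :=
    fA_stable finish _ _ _ (Or.inl (by omega)) (by omega) (by omega)
  by_cases hm : x % 2 = 1
  · have e3 : fA (finish - x).toNat (x + x + 1) finish = f (x + x + 1) finish :=
      fA_stable finish _ _ _ (Or.inl (by omega)) (by omega) (by omega)
    rw [if_pos hm, e1, e2, e3]
  · have e3 : fA (finish - x).toNat (x + x + 2) finish = f (x + x + 2) finish :=
      fA_stable finish _ _ _ (Or.inl (by omega)) (by omega) (by omega)
    rw [if_neg hm, e1, e2, e3]

-- the table lookup returns A's value, for any v above the frontier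
lemma atT_eq (finish : Int) (t : List Int) (v : Int)
    (hinv : ∀ i : Nat, i < t.length → t.getD i 0 = f (finish - i) finish)
    (hv : finish - t.length < v) :
    atT finish t v = f v finish := by
  unfold atT
  by_cases h1 : v = finish
  · simp [h1, f_base_self]
  · rw [if_neg h1]
    by_cases h2 : v > finish ∨ v = 21
    · rw [if_pos h2]
      rcases h2 with hg | h21
      · exact (f_gt v finish hg).symm
      · subst h21
        exact (f_21 finish h1).symm
    · rw [if_neg h2]
      have hle : v ≤ finish := by rcases not_or.mp h2 with ⟨hng, _⟩; omega
      have hiN : (finish - v).toNat < t.length := by omega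
      have := hinv (finish - v).toNat hiN
      rw [this]
      congr 1
      omega

lemma build_spec (finish : Int) : ∀ (k : Nat) (t : List Int),
    1 ≤ t.length → (t.length : Int) + k ≤ finish + 1 →
    (∀ i : Nat, i < t.length → t.getD i 0 = f (finish - i) finish) →
    (build finish k t).length = t.length + k ∧
      ∀ i : Nat, i < t.length + k → (build finish k t).getD i 0 = f (finish - i) finish := by
  intro k
  induction k with
  | zero => intro t h1 _ hinv; exact ⟨by simp [build], by simpa [build] using hinv⟩
  | succ k ih =>
    intro t h1 hlen hinv
    have hv0 : 0 ≤ finish - (t.length : Int) := by push_cast at hlen; omega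
    have hvlt : finish - (t.length : Int) < finish := by omega
    -- the appended entry equals f (finish - t.length) finish
    have he : (if finish - (t.length:Int) = 21 then 0
        else atT finish t (finish - (t.length:Int) + 1) + atT finish t (finish - (t.length:Int) + 4) +
          atT finish t (if (finish - (t.length:Int)) % 2 = 1
            then (finish - (t.length:Int)) + (finish - (t.length:Int)) + 1
            else (finish - (t.length:Int)) + (finish - (t.length:Int)) + 2)) =
        f (finish - (t.length:Int)) finish := by
      by_cases h21 : finish - (t.length:Int) = 21
      · rw [if_pos h21, h21]
        exact (f_21 finish (by omega)).symm
      · rw [if_neg h21]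
        rw [f_unfold (finish - (t.length:Int)) finish hv0 hvlt h21]
        rw [atT_eq finish t _ hinv (by omega), atT_eq finish t _ hinv (by omega),
            atT_eq finish t _ hinv (by split_ifs <;> omega)]
    set e : Int := (if finish - (t.length:Int) = 21 then 0
        else atT finish t (finish - (t.length:Int) + 1) + atT finish t (finish - (t.length:Int) + 4) +
          atT finish t (if (finish - (t.length:Int)) % 2 = 1
            then (finish - (t.length:Int)) + (finish - (t.length:Int)) + 1
            else (finish - (t.length:Int)) + (finish - (t.length:Int)) + 2)) with hedef
    have hinv' : ∀ i : Nat, i < (t ++ [e]).length → (t ++ [e]).getD i 0 = f (finish - i) finish := by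
      intro i hi
      simp only [List.length_append, List.length_cons, List.length_nil] at hi
      by_cases hiL : i < t.length
      · rw [List.getD_eq_getElem?_getD, List.getElem?_append_left (by omega),
            ← List.getD_eq_getElem?_getD]
        exact hinv i hiL
      · have hiEq : i = t.length := by omega
        subst hiEq
        rw [List.getD_eq_getElem?_getD, List.getElem?_append_right (by omega)]
        simpa using he
    have hstep := ih (t ++ [e]) (by simp) (by simp; push_cast at hlen ⊢; omega) hinv'
    rw [build]
    rw [← hedef]
    constructor
    · rw [hstep.1]; simp; omega
    · intro i hi
      apply hstep.2
      simp; omega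

-- ===== VERDICT (by name: the statement is the Claim_ definition above) =====
theorem f_spec : Claim_equal_f := by
  intro x finish _ hpre
  unfold Spec_f f_alt
  by_cases h1 : x = finish
  · simp [h1, f_base_self]
  · by_cases h2 : x > finish ∨ x = 21
    · rw [if_neg h1, if_pos h2]
      rcases h2 with hg | h21
      · exact f_gt x finish hg
      · subst h21
        exact f_21 finish h1
    · rw [if_neg h1, if_neg h2]
      have hle : x < finish := by rcases not_or.mp h2 with ⟨hng, _⟩; omega
      have hx0 : 0 ≤ x := by
        rcases hpre with h0 | h0
        · exact h0
        · omega
      have hbs := build_spec finish (finish - x).toNat [1] (by simp)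
        (by simp; omega)
        (by intro i hi
            simp at hi
            subst hi
            simpa using (f_base_self finish).symm)
      have := hbs.2 (finish - x).toNat (by simp)
      rw [this]
      congr 1
      omega
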